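-- pv_equiv track=rewrite | github.com/nathanwang000/music_theory | composition/simple.py | note2number
-- ===== SOURCE A (Python) =====
-- def note2number(note):
--     '''
--     calculate the absolute number from note to number
--     ex: "c" -> 0
--     ex: "fis''" -> 12 * 2 + 6 = 30
--     ex: "c," -> -12
--     '''
--     notes = ['c', 'd', 'e', 'f', 'g', 'a', 'b']
--     degrees = [0, 2, 4, 5, 7, 9, 11]
--     n = degrees[notes.index(note[0])]
--     c = ""
--     for p in range(1, len(note)):
--         c = c + note[p]
--         if c == 'is':
--             n += 1
--             c = ""
--         elif c == 'es':
--             n -= 1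
--             c = ""
--         elif c == "'":
--             n += 12
--             c = ""
--         elif c == ',':
--             n -= 12
--             c = ""
--     assert c == "", "have unparsed note {}".format(c)
--     return n
-- ===== SOURCE B (Python) =====
-- import re
--
--
-- def note2number(note):
--     notes = ['c', 'd', 'e', 'f', 'g', 'a', 'b']
--     degrees = [0, 2, 4, 5, 7, 9, 11]
--     n = degrees[notes.index(note[0])]
--     suffix = note[1:]
--     assert re.fullmatch(r"(?:is|es|'|,)*", suffix) is not None, \
--         "have unparsed note {}".format(suffix)
--     values = {"is": 1, "es": -1, "'": 12, ",": -12}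
--     return n + sum(values[tok] for tok in re.findall(r"is|es|'|,", suffix))
-- ===== Notes on version B (the rewrite author's own statement) =====
-- stated objective: idiomatic
-- what changed: Replaces A's incremental char-buffer state machine with a declarative regex pass: validate the suffix with re.fullmatch, tokenize it with re.findall, and sum the tokens' values from a table.
import Mathlib
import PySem

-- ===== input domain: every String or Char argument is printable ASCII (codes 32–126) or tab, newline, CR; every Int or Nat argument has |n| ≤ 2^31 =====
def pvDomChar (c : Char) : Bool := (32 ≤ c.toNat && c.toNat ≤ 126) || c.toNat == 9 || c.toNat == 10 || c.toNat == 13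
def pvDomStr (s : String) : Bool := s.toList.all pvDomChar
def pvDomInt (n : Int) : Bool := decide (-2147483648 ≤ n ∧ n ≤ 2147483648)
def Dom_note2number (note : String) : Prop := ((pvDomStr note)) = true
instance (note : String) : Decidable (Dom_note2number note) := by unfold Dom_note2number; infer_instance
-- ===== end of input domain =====

-- B replaces A's incremental char-buffer state machine with regex validate + tokenize + sum (idiomatic; same cost).
-- Exceptions of A (IndexError/ValueError/AssertionError) are excluded by Pre_; B raises on the same inputs.

-- ===== PORT A =====
-- the loop body: c = c + note[p]; the if/elif chain on the buffer, in A's order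
def pvStepA (st : Int × List Char) (ch : Char) : Int × List Char :=
  let c := st.2 ++ [ch]
  if c = ['i','s'] then (st.1 + 1, [])
  else if c = ['e','s'] then (st.1 - 1, [])
  else if c = ['\''] then (st.1 + 12, [])
  else if c = [','] then (st.1 - 12, [])
  else (st.1, c)

def note2number (note : String) : Int :=
  let notes : List Char := ['c', 'd', 'e', 'f', 'g', 'a', 'b']
  let degrees : List Int := [0, 2, 4, 5, 7, 9, 11]
  match PySem.Str.pyGet? note 0 with          -- note[0]; none = IndexError, excluded by Pre_
  | none => 0
  | some ch =>
    match PySem.List.index? notes ch with     -- notes.index(...); none = ValueError, excluded by Pre_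
    | none => 0
    | some i =>
      match PySem.List.pyGet? degrees (i : Int) with
      | none => 0
      | some n0 =>
        -- for p in range(1, len(note)): iterates exactly the chars note[1], …, note[len-1]
        let r := (note.toList.drop 1).foldl pvStepA (n0, ([] : List Char))
        if r.2 = [] then r.1 else 0           -- assert c == ""; failure = AssertionError, excluded by Pre_

-- ===== PORT B =====
-- re.fullmatch(r"(?:is|es|'|,)*", suffix) is not None   (exact: the token-star grammar)
def pvSuffixOK : List Char → Bool
  | [] => true
  | 'i' :: 's' :: t => pvSuffixOK t
  | 'e' :: 's' :: t => pvSuffixOK t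
  | '\'' :: t => pvSuffixOK t
  | ',' :: t => pvSuffixOK t
  | _ => false

-- re.findall(r"is|es|'|,", suffix): at each position try the alternatives in order, else advance one char (exact)
def pvTokens : List Char → List (List Char)
  | [] => []
  | 'i' :: 's' :: t => ['i','s'] :: pvTokens t
  | 'e' :: 's' :: t => ['e','s'] :: pvTokens t
  | '\'' :: t => ['\''] :: pvTokens t
  | ',' :: t => [','] :: pvTokens t
  | _ :: t => pvTokens t

-- values[tok]
def pvTokenVal : List Char → Int
  | ['i','s'] => 1
  | ['e','s'] => -1
  | ['\''] => 12
  | [','] => -12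
  | _ => 0

def note2number_alt (note : String) : Int :=
  match PySem.Str.pyGet? note 0 with          -- note[0]
  | none => 0
  | some ch =>
    match PySem.List.index? ['c','d','e','f','g','a','b'] ch with
    | none => 0
    | some i =>
      match PySem.List.pyGet? ([0, 2, 4, 5, 7, 9, 11] : List Int) (i : Int) with
      | none => 0
      | some n0 =>
        let suffix := note.toList.drop 1       -- note[1:]
        if pvSuffixOK suffix then              -- assert re.fullmatch(...) is not None
          n0 + ((pvTokens suffix).map pvTokenVal).sum
        else 0

-- ===== PRECONDITION & SPEC =====
-- adjacent-pair condition of a valid suffix: 'i'/'e' is immediately followed by 's', and 's' is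
-- immediately preceded by 'i' or 'e'
def pvPairOK (a b : Char) : Prop :=
  ((a = 'i' ∨ a = 'e') → b = 's') ∧ (b = 's' → (a = 'i' ∨ a = 'e'))

-- Pre_ excludes exactly the inputs where A raises: empty string (IndexError), first char not a
-- note letter (ValueError), or a suffix that is not a sequence of the tokens is/es/'/, (AssertionError);
-- the suffix condition is stated positionally: only chars ' , i e s; each i/e immediately followed by s,
-- each s immediately preceded by i/e (so it neither starts with s nor ends in i/e).
def Pre_note2number (note : String) : Prop :=
  note.toList ≠ [] ∧
  note.toList.headD ' ' ∈ (['c', 'd', 'e', 'f', 'g', 'a', 'b'] : List Char) ∧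
  ((note.toList.drop 1).all (fun c => c == '\'' || c == ',' || c == 'i' || c == 'e' || c == 's') = true) ∧
  List.IsChain pvPairOK (note.toList.drop 1) ∧
  (note.toList.drop 1).head? ≠ some 's' ∧
  (note.toList.drop 1).getLast? ≠ some 'i' ∧ (note.toList.drop 1).getLast? ≠ some 'e'
instance (note : String) : Decidable (Pre_note2number note) := by
  unfold Pre_note2number pvPairOK; infer_instance

def pvWitness_note2number : String := "c,"

def Spec_note2number (note : String) (out : Int) : Prop := out = note2number_alt note
instance (note : String) (out : Int) : Decidable (Spec_note2number note out) := by unfold Spec_note2number; infer_instance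

-- ===== CLAIM (what is proved, stated in full; the proofs are below) =====
def Claim_equal_note2number : Prop := ∀ (note : String), Dom_note2number note → Pre_note2number note → Spec_note2number note (note2number note)

-- ===== LEMMAS AND PROOFS =====
-- the positional conditions of Pre_ imply that the suffix is a sequence of the tokens is/es/'/,
theorem pvClosed_suffixOK (n : Nat) : ∀ t : List Char, t.length ≤ n →
    (t.all (fun c => c == '\'' || c == ',' || c == 'i' || c == 'e' || c == 's') = true) →
    List.IsChain pvPairOK t →
    t.head? ≠ some 's' →
    t.getLast? ≠ some 'i' → t.getLast? ≠ some 'e' →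
    pvSuffixOK t = true := by
  induction n with
  | zero =>
    intro t hlen _ _ _ _ _
    have : t = [] := List.eq_nil_of_length_eq_zero (Nat.le_zero.mp hlen)
    simp [this, pvSuffixOK]
  | succ n ih =>
    intro t hlen h1 h2 h3 h4 h5
    match t with
    | [] => simp [pvSuffixOK]
    | a :: rest =>
      rw [List.all_cons, Bool.and_eq_true] at h1
      obtain ⟨ha, h1⟩ := h1
      simp only [Bool.or_eq_true, beq_iff_eq, or_assoc] at ha
      rcases ha with ha | ha | ha | ha | ha <;> subst ha
      · -- '\''
        match rest with
        | [] => simp [pvSuffixOK]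
        | c :: t2 =>
          rw [List.isChain_cons_cons] at h2
          have hs : pvSuffixOK (c :: t2) = true := by
            refine ih (c :: t2) (by simpa using hlen) h1 h2.2 ?_ (by simpa using h4) (by simpa using h5)
            intro hc
            simp only [List.head?_cons, Option.some.injEq] at hc
            rcases h2.1.2 hc with h | h <;> simp at h
          simpa [pvSuffixOK] using hs
      · -- ','
        match rest with
        | [] => simp [pvSuffixOK]
        | c :: t2 =>
          rw [List.isChain_cons_cons] at h2
          have hs : pvSuffixOK (c :: t2) = true := by
            refine ih (c :: t2) (by simpa using hlen) h1 h2.2 ?_ (by simpa using h4) (by simpa using h5)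
            intro hc
            simp only [List.head?_cons, Option.some.injEq] at hc
            rcases h2.1.2 hc with h | h <;> simp at h
          simpa [pvSuffixOK] using hs
      · -- 'i'
        match rest with
        | [] => simp at h4
        | c :: t2 =>
          rw [List.isChain_cons_cons] at h2
          have hc : c = 's' := h2.1.1 (Or.inl rfl)
          subst hc
          have hs : pvSuffixOK t2 = true := by
            match t2 with
            | [] => simp [pvSuffixOK]
            | d :: t3 =>
              rw [List.isChain_cons_cons] at h2
              refine ih (d :: t3) (by simp at hlen ⊢; omega) (by rw [List.all_cons, Bool.and_eq_true] at h1; exact h1.2) h2.2.2 ?_ (by simpa using h4) (by simpa using h5)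
              intro hd
              simp only [List.head?_cons, Option.some.injEq] at hd
              rcases h2.2.1.2 hd with h | h <;> simp at h
          simpa [pvSuffixOK] using hs
      · -- 'e'
        match rest with
        | [] => simp at h5
        | c :: t2 =>
          rw [List.isChain_cons_cons] at h2
          have hc : c = 's' := h2.1.1 (Or.inr rfl)
          subst hc
          have hs : pvSuffixOK t2 = true := by
            match t2 with
            | [] => simp [pvSuffixOK]
            | d :: t3 =>
              rw [List.isChain_cons_cons] at h2
              refine ih (d :: t3) (by simp at hlen ⊢; omega) (by rw [List.all_cons, Bool.and_eq_true] at h1; exact h1.2) h2.2.2 ?_ (by simpa using h4) (by simpa using h5)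
              intro hd
              simp only [List.head?_cons, Option.some.injEq] at hd
              rcases h2.2.1.2 hd with h | h <;> simp at h
          simpa [pvSuffixOK] using hs
      · -- 's' cannot start the suffix
        simp at h3

-- A's buffer loop, started with an empty buffer on a valid token string, ends with an empty
-- buffer and adds exactly the sum of the token values B computes.
theorem pvLoop_eq (t : List Char) (h : pvSuffixOK t = true) (n : Int) :
    t.foldl pvStepA (n, ([] : List Char)) = (n + ((pvTokens t).map pvTokenVal).sum, []) := by
  fun_induction pvSuffixOK t generalizing n with
  | case1 => simp [pvTokens]
  | case2 t ih =>
      have := ih (by simpa [pvSuffixOK] using h) (n + 1)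
      simp only [List.foldl, pvStepA] at *
      simp_all [pvTokens, pvTokenVal]; ring
  | case3 t ih =>
      have := ih (by simpa [pvSuffixOK] using h) (n - 1)
      simp only [List.foldl, pvStepA] at *
      simp_all [pvTokens, pvTokenVal]; ring
  | case4 t ih =>
      have := ih (by simpa [pvSuffixOK] using h) (n + 12)
      simp only [List.foldl, pvStepA] at *
      simp_all [pvTokens, pvTokenVal]; ring
  | case5 t ih =>
      have := ih (by simpa [pvSuffixOK] using h) (n - 12)
      simp only [List.foldl, pvStepA] at *
      simp_all [pvTokens, pvTokenVal]; ring
  | case6 => simp at h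

-- ===== VERDICT (by name: the statement is the Claim_ definition above) =====
theorem note2number_spec : Claim_equal_note2number := by
  intro note _ hpre
  obtain ⟨hne, -, h1, h2, h3, h4, h5⟩ := hpre
  have hok : pvSuffixOK (note.toList.drop 1) = true :=
    pvClosed_suffixOK (note.toList.drop 1).length _ le_rfl h1 h2 h3 h4 h5
  unfold Spec_note2number note2number note2number_alt
  simp only [PySem.Str.pyGet?_eq, PySem.Chars.pyGet?_eq_listPyGet?]
  cases PySem.List.pyGet? note.toList 0 with
  | none => rfl
  | some ch =>
    dsimp only
    cases PySem.List.index? ['c','d','e','f','g','a','b'] ch with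
    | none => rfl
    | some i =>
      dsimp only
      cases PySem.List.pyGet? ([0,2,4,5,7,9,11] : List Int) (i : Int) with
      | none => rfl
      | some n0 =>
        dsimp only
        rw [pvLoop_eq _ hok, hok]
        simp
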